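-- pv_equiv track=rewrite | github.com/mozilla/firefox-translations-training | tests/fixtures/__init__.py | split_on_ampersands_operator
-- ===== SOURCE A (Python) =====
-- def split_on_ampersands_operator(command_parts: list[str]) -> list[list[str]]:
--     """Splits a command with the bash && operator into multiple lists of commands."""
--     multiple_command_parts: list[list[str]] = []
--     sublist: list[str] = []
--     for part in command_parts:
--         if part.strip().startswith("&&"):
--             command_part = part.replace("&&", "").strip()
--             if len(command_part):
--                 sublist.append(command_part)
--             multiple_command_parts.append(sublist)
--             sublist = []
--         else:
--             sublist.append(part)
--     multiple_command_parts.append(sublist)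
--     return multiple_command_parts
-- ===== SOURCE B (Python) =====
-- def split_on_ampersands_operator(command_parts: list[str]) -> list[list[str]]:
--     """Splits a command with the bash && operator into multiple lists of commands."""
--     # pass 1: find the separators (index, cleaned remainder)
--     seps = [(i, part.replace("&&", "").strip())
--             for i, part in enumerate(command_parts)
--             if part.strip().startswith("&&")]
--     # pass 2: slice the input at the separator indices
--     groups: list[list[str]] = []
--     start = 0
--     for i, rest in seps:
--         segment = command_parts[start:i]
--         if rest:
--             segment.append(rest)
--         groups.append(segment)
--         start = i + 1
--     groups.append(command_parts[start:])
--     return groups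
-- ===== Notes on version B (the rewrite author's own statement) =====
-- stated objective: alternative
-- what changed: Replaces A's single forward loop with a flushed sublist accumulator by two staged passes: pass 1 collects the separator positions with their cleaned remainders (enumerate + filter), pass 2 slices the input between consecutive separator indices, appending each nonempty remainder to its preceding segment and the trailing slice as the final group.
import Mathlib
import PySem

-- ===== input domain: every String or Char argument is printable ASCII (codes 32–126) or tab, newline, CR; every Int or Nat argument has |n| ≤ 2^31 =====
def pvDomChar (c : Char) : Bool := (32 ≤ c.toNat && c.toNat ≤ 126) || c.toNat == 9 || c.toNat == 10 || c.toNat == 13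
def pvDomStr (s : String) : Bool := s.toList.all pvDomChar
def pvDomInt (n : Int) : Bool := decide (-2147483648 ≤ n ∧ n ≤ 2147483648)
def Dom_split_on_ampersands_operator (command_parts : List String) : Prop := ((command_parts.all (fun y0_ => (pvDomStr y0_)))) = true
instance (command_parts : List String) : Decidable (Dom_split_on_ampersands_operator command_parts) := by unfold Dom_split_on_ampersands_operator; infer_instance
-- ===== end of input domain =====

-- ===== PORT A =====
-- B replaces A's one forward flush-on-separator loop by two staged passes (find separator indices, then slice between them); "alternative", same cost; neither mutates its argument.
def pvStepA (st : List (List String) × List String) (part : String) : List (List String) × List String :=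
  if PySem.Str.startswith (PySem.Str.strip part) "&&" then
    let command_part := PySem.Str.strip (PySem.Str.replace part "&&" "")
    let sublist := if PySem.Str.len command_part ≠ 0 then st.2 ++ [command_part] else st.2
    (st.1 ++ [sublist], [])
  else
    (st.1, st.2 ++ [part])

def split_on_ampersands_operator (command_parts : List String) : List (List String) :=
  let st := command_parts.foldl pvStepA ([], [])
  st.1 ++ [st.2]

-- ===== PORT B =====
-- pass 1: separator records (index, cleaned remainder)
def pvSeps (command_parts : List String) : List (Int × String) :=
  (PySem.List.enumerate command_parts 0).filterMap (fun ip =>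
    if PySem.Str.startswith (PySem.Str.strip ip.2) "&&" then
      some (ip.1, PySem.Str.strip (PySem.Str.replace ip.2 "&&" ""))
    else none)

-- pass 2: one slice per separator, remainder appended when nonempty
def pvCut (command_parts : List String) (st : List (List String) × Int) (sep : Int × String) :
    List (List String) × Int :=
  let segment := PySem.List.slice command_parts (some st.2) (some sep.1)
  let segment := if sep.2 ≠ "" then segment ++ [sep.2] else segment
  (st.1 ++ [segment], sep.1 + 1)

def split_on_ampersands_operator_alt (command_parts : List String) : List (List String) :=
  let st := (pvSeps command_parts).foldl (pvCut command_parts) ([], 0)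
  st.1 ++ [PySem.List.slice command_parts (some st.2) none]

-- ===== PRECONDITION & SPEC =====
def Spec_split_on_ampersands_operator (command_parts : List String) (out : List (List String)) : Prop := out = split_on_ampersands_operator_alt command_parts
instance (command_parts : List String) (out : List (List String)) : Decidable (Spec_split_on_ampersands_operator command_parts out) := by unfold Spec_split_on_ampersands_operator; infer_instance

-- ===== CLAIM (what is proved, stated in full; the proofs are below) =====
def Claim_equal_split_on_ampersands_operator : Prop := ∀ (command_parts : List String), Dom_split_on_ampersands_operator command_parts → Spec_split_on_ampersands_operator command_parts (split_on_ampersands_operator command_parts)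

-- ===== LEMMAS AND PROOFS =====

-- reference splitting: one structural-recursion step per part, groups front-first
def pvGStep (part : String) (groups : List (List String)) : List (List String) :=
  if PySem.Str.startswith (PySem.Str.strip part) "&&" then
    let rest := PySem.Str.strip (PySem.Str.replace part "&&" "")
    (if rest ≠ "" then [rest] else []) :: groups
  else
    match groups with
    | [] => [[part]]          -- unreachable from [[]]
    | g :: gs => (part :: g) :: gs

def pvGroups (xs : List String) : List (List String) := xs.foldr pvGStep [[]]

-- prepending pending material onto the first group
def pvPrepHead (sub : List String) (groups : List (List String)) : List (List String) :=
  match groups with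
  | [] => [sub]
  | g :: gs => (sub ++ g) :: gs

lemma pvGStep_ne_nil (p : String) (gs : List (List String)) : pvGStep p gs ≠ [] := by
  unfold pvGStep
  split
  · simp
  · cases gs <;> simp

lemma pvGroups_ne_nil (xs : List String) : pvGroups xs ≠ [] := by
  cases xs with
  | nil => simp [pvGroups]
  | cons p t =>
      simp only [pvGroups, List.foldr_cons]
      exact pvGStep_ne_nil p (List.foldr pvGStep [[]] t)

-- A's loop, run from any accumulator, yields the accumulator followed by the
-- reference groups with the pending sublist merged into the first group.
lemma pvMain (xs : List String) : ∀ (out : List (List String)) (sub : List String),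
    (xs.foldl pvStepA (out, sub)).1 ++ [(xs.foldl pvStepA (out, sub)).2]
      = out ++ pvPrepHead sub (pvGroups xs) := by
  induction xs with
  | nil => intro out sub; simp [pvGroups, pvPrepHead]
  | cons p t ih =>
    intro out sub
    obtain ⟨g, gs, hg⟩ := List.exists_cons_of_ne_nil (pvGroups_ne_nil t)
    by_cases hs : PySem.Str.startswith (PySem.Str.strip p) "&&"
    · have hgr : pvGroups (p :: t) =
          (if PySem.Str.strip (PySem.Str.replace p "&&" "") ≠ "" then
            [PySem.Str.strip (PySem.Str.replace p "&&" "")] else []) :: pvGroups t := by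
        simp only [pvGroups, List.foldr_cons, pvGStep, hs, if_pos]
      have hsC := hs
      simp at hsC
      by_cases hne : PySem.Str.strip (PySem.Str.replace p "&&" "") = ""
      · have hneC : PySem.Chars.strip (PySem.Chars.replace p.toList ['&','&'] []) = ([] : List Char) := by
          have h2 := congrArg String.toList hne
          simpa using h2
        simp [List.foldl_cons, pvStepA, hsC, ih, hgr, hne, hg, pvPrepHead]
      · have hneC : ¬ PySem.Chars.strip (PySem.Chars.replace p.toList ['&','&'] []) = ([] : List Char) := by
          intro h
          apply hne
          have h2 : (PySem.Str.strip (PySem.Str.replace p "&&" "")).toList = [] := by simpa using h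
          exact String.toList_eq_nil_iff.mp h2
        simp [List.foldl_cons, pvStepA, hsC, ih, hgr, hne, hneC, hg, pvPrepHead]
    · have hsC := hs
      simp at hsC
      have hgr : pvGroups (p :: t) = pvPrepHead [p] (pvGroups t) := by
        simp [pvGroups, pvGStep, hsC, pvPrepHead]
      simp [List.foldl_cons, pvStepA, hsC, ih, hgr, hg, pvPrepHead]

-- pvSeps generalized over the enumerate start, for the induction
def pvSepsFrom (xs : List String) (s : Int) : List (Int × String) :=
  (PySem.List.enumerate xs s).filterMap (fun ip =>
    if PySem.Str.startswith (PySem.Str.strip ip.2) "&&" then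
      some (ip.1, PySem.Str.strip (PySem.Str.replace ip.2 "&&" ""))
    else none)

lemma pvSepsFrom_nil (s : Int) : pvSepsFrom [] s = [] := by
  simp [pvSepsFrom, PySem.List.enumerate_nil]

lemma pvSepsFrom_cons (p : String) (t : List String) (s : Int) :
    pvSepsFrom (p :: t) s =
      (if PySem.Str.startswith (PySem.Str.strip p) "&&" then
        [(s, PySem.Str.strip (PySem.Str.replace p "&&" ""))] else [])
      ++ pvSepsFrom t (s + 1) := by
  by_cases hs : PySem.Chars.startswith (PySem.Chars.strip p.toList) ['&','&'] = true <;>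
    simp [pvSepsFrom, PySem.List.enumerate_cons, hs]

-- slicing out the pending prefix of the remaining suffix
lemma pvSlicePend (xs pend rest : List String) (s : Int) (h0 : 0 ≤ s)
    (hdrop : xs.drop s.toNat = pend ++ rest) :
    PySem.List.slice xs (some s) (some (s + pend.length)) = pend := by
  rw [PySem.List.slice_toNat xs h0 (by omega)]
  have htn : (s + (pend.length : Int)).toNat - s.toNat = pend.length := by omega
  rw [htn, hdrop, List.take_left]

-- B's two-pass machinery, run on any suffix with any pending prefix, yields the
-- reference groups with the pending prefix merged into the first group.
lemma pvBMain (xs : List String) (ys : List String) :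
    ∀ (s : Int) (pend : List String) (acc : List (List String)), 0 ≤ s →
    xs.drop s.toNat = pend ++ ys →
    (let st := (pvSepsFrom ys (s + pend.length)).foldl (pvCut xs) (acc, s)
     st.1 ++ [PySem.List.slice xs (some st.2) none])
      = acc ++ pvPrepHead pend (pvGroups ys) := by
  induction ys with
  | nil =>
      intro s pend acc h0 hdrop
      simp only [pvSepsFrom_nil, List.foldl_nil]
      rw [PySem.List.slice_from xs h0, hdrop]
      simp [pvGroups, pvPrepHead]
  | cons p t ih =>
      intro s pend acc h0 hdrop
      obtain ⟨g, gs, hg⟩ := List.exists_cons_of_ne_nil (pvGroups_ne_nil t)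
      by_cases hs : PySem.Str.startswith (PySem.Str.strip p) "&&"
      · have hseps := pvSepsFrom_cons p t (s + pend.length)
        rw [if_pos hs] at hseps
        have hpend := pvSlicePend xs pend (p :: t) s h0 hdrop
        have hdrop' : xs.drop (s + (pend.length : Int) + 1).toNat = [] ++ t := by
          have h1 : (s + (pend.length : Int) + 1).toNat = s.toNat + (pend.length + 1) := by omega
          rw [h1, ← List.drop_drop, hdrop]
          have : (pend ++ p :: t).drop (pend.length + 1)
              = ((pend ++ [p]) ++ t).drop (pend ++ [p]).length := by
            simp
          rw [this, List.drop_left]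
          simp
        have hstep : pvCut xs (acc, s)
            (s + (pend.length : Int), PySem.Str.strip (PySem.Str.replace p "&&" ""))
            = (acc ++ [pend ++
                (if PySem.Str.strip (PySem.Str.replace p "&&" "") ≠ "" then
                  [PySem.Str.strip (PySem.Str.replace p "&&" "")] else [])],
               s + pend.length + 1) := by
          by_cases hne : PySem.Str.strip (PySem.Str.replace p "&&" "") = "" <;>
            simp [pvCut, hpend, hne]
        have hIH := ih (s + pend.length + 1) [] (acc ++ [pend ++
            (if PySem.Str.strip (PySem.Str.replace p "&&" "") ≠ "" then
              [PySem.Str.strip (PySem.Str.replace p "&&" "")] else [])]) (by omega) hdrop'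
        simp only [List.length_nil, Nat.cast_zero, add_zero] at hIH
        have hgr : pvGroups (p :: t) =
            (if PySem.Str.strip (PySem.Str.replace p "&&" "") ≠ "" then
              [PySem.Str.strip (PySem.Str.replace p "&&" "")] else []) :: pvGroups t := by
          simp only [pvGroups, List.foldr_cons, pvGStep, hs, if_pos]
        rw [hseps]
        simp only [List.singleton_append, List.foldl_cons, hstep]
        rw [hIH, hgr, hg]
        simp [pvPrepHead]
      · have hseps := pvSepsFrom_cons p t (s + pend.length)
        rw [if_neg hs, List.nil_append] at hseps
        have hdrop' : xs.drop s.toNat = (pend ++ [p]) ++ t := by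
          rw [hdrop]; simp
        have hIH := ih s (pend ++ [p]) acc h0 hdrop'
        have hoff : s + ((pend ++ [p]).length : Int) = s + pend.length + 1 := by
          simp; ring
        rw [hoff] at hIH
        rw [hseps, hIH]
        have hsC := hs
        simp at hsC
        have hgr : pvGroups (p :: t) = (p :: g) :: gs := by
          have hstep : pvGroups (p :: t) = pvGStep p (pvGroups t) := by
            simp only [pvGroups, List.foldr_cons]
          rw [hstep, hg]
          simp [pvGStep, hsC]
        rw [hgr, hg]
        simp [pvPrepHead]

-- ===== VERDICT (by name: the statement is the Claim_ definition above) =====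
theorem split_on_ampersands_operator_spec : Claim_equal_split_on_ampersands_operator := by
  intro xs _
  unfold Spec_split_on_ampersands_operator split_on_ampersands_operator split_on_ampersands_operator_alt
  obtain ⟨g, gs, hg⟩ := List.exists_cons_of_ne_nil (pvGroups_ne_nil xs)
  have hA := pvMain xs [] []
  have hB := pvBMain xs xs 0 [] [] le_rfl (by simp)
  have hseps : pvSeps xs = pvSepsFrom xs 0 := rfl
  simp only [List.length_nil, Nat.cast_zero, add_zero] at hB
  simp only [List.nil_append] at hA hB
  rw [hA, hseps, hB, hg]
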